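-- pv_equiv track=rewrite | github.com/yavor-gornalov/softuni_programming_fundamentals | python_fundamentals/21_dictionaries_more/01_ranking_ver2.py | get_best_candidate
-- ===== SOURCE A (Python) =====
-- def get_best_candidate(user_submissions):
--     best_candidate_name = ""
--     best_candidate_result = 0
--     for candidate, contests in user_submissions.items():
--         candidate_result = sum(contests.values())
--         if candidate_result > best_candidate_result:
--             best_candidate_name = candidate
--             best_candidate_result = candidate_result
--
--     return best_candidate_name, best_candidate_result
-- ===== SOURCE B (Python) =====
-- def get_best_candidate(user_submissions):
--     # Rank all candidates by total score, best first; Python's sort is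
--     # stable, so the first-ranked entry is the earliest-inserted maximum.
--     ranked = sorted(user_submissions.items(),
--                     key=lambda kv: sum(kv[1].values()),
--                     reverse=True)
--     if not ranked:
--         return "", 0
--     name, contests = ranked[0]
--     total = sum(contests.values())
--     if total > 0:
--         return name, total
--     return "", 0
-- ===== Notes on version B (the rewrite author's own statement) =====
-- stated objective: alternative
-- what changed: Replaces the running-max accumulator loop by a stable descending sort of the items keyed by total score, taking the head of the ranking and applying the positivity threshold.
import Mathlib
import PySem

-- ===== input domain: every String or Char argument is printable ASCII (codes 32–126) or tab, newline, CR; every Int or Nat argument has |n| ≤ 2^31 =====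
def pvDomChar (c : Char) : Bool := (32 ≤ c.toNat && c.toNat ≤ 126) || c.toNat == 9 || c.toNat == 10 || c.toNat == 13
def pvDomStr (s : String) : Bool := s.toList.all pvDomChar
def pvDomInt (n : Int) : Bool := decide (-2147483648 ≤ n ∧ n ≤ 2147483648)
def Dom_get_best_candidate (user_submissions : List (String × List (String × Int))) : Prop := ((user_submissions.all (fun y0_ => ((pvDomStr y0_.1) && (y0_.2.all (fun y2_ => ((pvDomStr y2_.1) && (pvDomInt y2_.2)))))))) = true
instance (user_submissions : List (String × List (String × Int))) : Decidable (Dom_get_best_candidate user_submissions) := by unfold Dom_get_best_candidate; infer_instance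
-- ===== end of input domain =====

-- B replaces A's running-max loop by a stable descending sort on total score,
-- taking the head of the ranking and applying the positivity threshold; alternative decomposition.

-- the total-score key shared by both ports (sum(contests.values()))
def pvKey (kv : String × List (String × Int)) : Int := (kv.2.map Prod.snd).sum

-- ===== PORT A =====
-- running best with strict '>' over the items, sentinel ("", 0)
def get_best_candidate (user_submissions : List (String × List (String × Int))) : String × Int :=
  user_submissions.foldl
    (fun (best : String × Int) cp =>
      let candidate_result : Int := pvKey cp   -- sum(contests.values())
      if best.2 < candidate_result then (cp.1, candidate_result) else best)
    ("", 0)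

-- ===== PORT B =====
def get_best_candidate_alt (user_submissions : List (String × List (String × Int))) : String × Int :=
  let ranked := PySem.List.sorted user_submissions pvKey true
  match ranked with
  | [] => ("", 0)
  | kv :: _ =>
      let total : Int := pvKey kv
      if 0 < total then (kv.1, total) else ("", 0)

-- ===== PRECONDITION & SPEC =====
def Spec_get_best_candidate (user_submissions : List (String × List (String × Int))) (out : String × Int) : Prop := out = get_best_candidate_alt user_submissions
instance (user_submissions : List (String × List (String × Int))) (out : String × Int) : Decidable (Spec_get_best_candidate user_submissions out) := by unfold Spec_get_best_candidate; infer_instance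

-- ===== CLAIM (what is proved, stated in full; the proofs are below) =====
def Claim_equal_get_best_candidate : Prop := ∀ (user_submissions : List (String × List (String × Int))), Dom_get_best_candidate user_submissions → Spec_get_best_candidate user_submissions (get_best_candidate user_submissions)

-- ===== LEMMAS AND PROOFS =====

-- A's loop body
def pvStep (b : String × Int) (kv : String × List (String × Int)) : String × Int :=
  if b.2 < pvKey kv then (kv.1, pvKey kv) else b

-- B's read-out of a ranking: head thresholded by positivity
def pvOut (acc : List (String × List (String × Int))) : String × Int :=
  match acc with
  | [] => ("", 0)
  | kv :: _ => if 0 < pvKey kv then (kv.1, pvKey kv) else ("", 0)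

-- head of a stable descending insertion: new element wins only on a strictly larger key
theorem pv_head_insertBy (x h : String × List (String × Int)) (t : List (String × List (String × Int))) :
    PySem.List.insertBy (fun a b => decide (pvKey b < pvKey a)) x (h :: t)
      = if pvKey h < pvKey x then x :: h :: t
        else h :: PySem.List.insertBy (fun a b => decide (pvKey b < pvKey a)) x t := by
  simp [PySem.List.insertBy]

-- invariant: A's running best is exactly pvOut of the insertion-sorted prefix
theorem pv_invariant (us : List (String × List (String × Int)))
    (acc : List (String × List (String × Int))) (best : String × Int)
    (h : best = pvOut acc) :
    us.foldl pvStep best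
      = pvOut (us.foldl (fun acc x => PySem.List.insertBy (fun a b => decide (pvKey b < pvKey a)) x acc) acc) := by
  induction us generalizing acc best with
  | nil => simpa using h
  | cons x us ih =>
    simp only [List.foldl_cons]
    apply ih
    cases acc with
    | nil =>
      subst h
      simp [PySem.List.insertBy, pvStep, pvOut]
    | cons hd t =>
      subst h
      rw [pv_head_insertBy]
      by_cases hx : pvKey hd < pvKey x
      · rw [if_pos hx]
        by_cases hp : 0 < pvKey hd
        · simp [pvOut, pvStep, hp, hx, lt_trans hp hx]
        · simp [pvOut, pvStep, hp]
      · rw [if_neg hx]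
        by_cases hp : 0 < pvKey hd
        · simp [pvOut, pvStep, hp, not_lt.mpr (not_lt.mp hx)]
        · have hx0 : ¬ (0 : Int) < pvKey x :=
            fun hc => hp (lt_of_lt_of_le hc (not_lt.mp hx))
          simp [pvOut, pvStep, hp, hx0]

-- ===== VERDICT (by name: the statement is the Claim_ definition above) =====
theorem get_best_candidate_spec : Claim_equal_get_best_candidate := by
  intro us _
  show get_best_candidate us = get_best_candidate_alt us
  unfold get_best_candidate get_best_candidate_alt
  have hA : (fun (best : String × Int) (cp : String × List (String × Int)) =>
        let candidate_result : Int := pvKey cp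
        if best.2 < candidate_result then (cp.1, candidate_result) else best) = pvStep := by
    funext b kv; rfl
  rw [hA, pv_invariant us [] ("", 0) rfl,
      ← PySem.List.sorted_rev_eq_foldl_insertBy us pvKey]
  cases PySem.List.sorted us pvKey true with
  | nil => rfl
  | cons m t => rfl
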